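-- pv_equiv track=rewrite | github.com/henry-grafe/lexsubcon-mod-test | dataset/LS14/all/coinco_information_extraction.py | find_word_indices_in_context
-- ===== SOURCE A (Python) =====
-- def find_word_indices_in_context(context, word):
--     lowercase_context = context.lower()
--     index = 0
--     found = False
--     while (index <= len(context)-len(word)) and (not found):
--         found = True
--         for i_relative in range(len(word)):
--             if context[index + i_relative] != word[i_relative]:
--                 found = False
--         index += 1
--     if not found:
--         return (-1, -1)
--     else:
--         return (index-1, index-1+len(word))
-- ===== SOURCE B (Python) =====
-- def find_word_indices_in_context(context, word):
--     i = context.find(word)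
--     if i < 0:
--         return (-1, -1)
--     return (i, i + len(word))
-- ===== Notes on version B (the rewrite author's own statement) =====
-- stated objective: faster
-- what changed: Replaces the hand-written quadratic shift-and-compare while/for scan with a single str.find call (CPython's optimized two-way substring search) plus span arithmetic.
import Mathlib
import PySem

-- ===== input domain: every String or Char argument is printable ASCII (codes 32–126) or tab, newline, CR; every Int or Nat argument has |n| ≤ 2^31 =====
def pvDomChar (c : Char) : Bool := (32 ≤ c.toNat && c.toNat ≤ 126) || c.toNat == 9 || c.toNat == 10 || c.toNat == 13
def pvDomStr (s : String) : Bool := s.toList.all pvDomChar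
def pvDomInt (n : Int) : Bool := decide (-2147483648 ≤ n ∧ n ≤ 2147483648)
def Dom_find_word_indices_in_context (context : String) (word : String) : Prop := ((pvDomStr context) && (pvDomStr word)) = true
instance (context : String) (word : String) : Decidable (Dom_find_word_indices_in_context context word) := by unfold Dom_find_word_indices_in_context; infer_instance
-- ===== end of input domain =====

-- B replaces A's hand-written shift-and-compare scan by a single str.find call plus span arithmetic (faster in a timing run).

-- ===== PORT A =====
-- the while loop of A: index advances by 1 until found or past len(context)-len(word)
def pvAgoA (ctx w : List Char) (index : Nat) : List Int :=
  if h : (index : Int) ≤ (ctx.length : Int) - (w.length : Int) then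
    -- found = True; for i_relative in range(len(word)): if mismatch: found = False
    let found := (PySem.List.pyRange 0 (w.length : Int) 1).foldl
      (fun f i => if PySem.List.pyGet? ctx ((index : Int) + i) ≠ PySem.List.pyGet? w i then false else f) true
    if found then [(index : Int), (index : Int) + (w.length : Int)]   -- (index-1, index-1+len(word)) after the increment
    else pvAgoA ctx w (index + 1)
  else [-1, -1]
termination_by ctx.length + 1 - index
decreasing_by omega

def find_word_indices_in_context (context : String) (word : String) : List Int :=
  let _lowercase_context := PySem.Str.lower context   -- computed and unused, as in A
  pvAgoA context.toList word.toList 0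

-- ===== PORT B =====
def find_word_indices_in_context_alt (context : String) (word : String) : List Int :=
  let i := PySem.Str.find context word
  if i < 0 then [-1, -1] else [i, i + (PySem.Str.len word : Int)]

-- ===== PRECONDITION & SPEC =====
def Spec_find_word_indices_in_context (context : String) (word : String) (out : List Int) : Prop := out = find_word_indices_in_context_alt context word
instance (context : String) (word : String) (out : List Int) : Decidable (Spec_find_word_indices_in_context context word out) := by unfold Spec_find_word_indices_in_context; infer_instance

-- ===== CLAIM (what is proved, stated in full; the proofs are below) =====
def Claim_equal_find_word_indices_in_context : Prop := ∀ (context : String) (word : String), Dom_find_word_indices_in_context context word → Spec_find_word_indices_in_context context word (find_word_indices_in_context context word)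

-- ===== LEMMAS AND PROOFS =====

-- a fold that can only switch the flag to false computes a conjunction
theorem pv_foldl_all {α : Type} (p : α → Prop) [DecidablePred p] (l : List α) (b : Bool) :
    l.foldl (fun f i => if p i then false else f) b = (b && l.all fun i => !(decide (p i))) := by
  induction l generalizing b with
  | nil => simp
  | cons a l ih =>
    simp only [List.foldl_cons, List.all_cons, ih]
    by_cases h : p a <;> simp [h]

-- the inner for-loop of A decides "word is a prefix of context.drop index"
theorem pv_inner_prefix (ctx w : List Char) (k : Nat) (hk : k + w.length ≤ ctx.length) :
    ((PySem.List.pyRange 0 (w.length : Int) 1).foldl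
      (fun f i => if PySem.List.pyGet? ctx ((k : Int) + i) ≠ PySem.List.pyGet? w i then false else f) true)
      = decide (w <+: ctx.drop k) := by
  rw [pv_foldl_all]
  simp only [Bool.true_and]
  rcases Decidable.em (w <+: ctx.drop k) with hp | hp
  · simp only [hp, decide_true]
    rw [List.all_eq_true]
    intro i hi
    rw [PySem.List.mem_pyRange_one] at hi
    obtain ⟨h0, h1⟩ := hi
    lift i to Nat using h0
    have hilt : i < w.length := by exact_mod_cast h1
    have : (k : Int) + (i : Int) = ((k + i : Nat) : Int) := by push_cast; ring
    rw [this, PySem.List.pyGet?_natCast, PySem.List.pyGet?_natCast]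
    obtain ⟨t, ht⟩ := hp
    have : ctx[k + i]? = w[i]? := by
      have hdrop : (ctx.drop k)[i]? = ctx[k + i]? := by
        rw [List.getElem?_drop]
      rw [← hdrop, ← ht]
      rw [List.getElem?_append_left (by omega)]
    simp [this]
  · simp only [hp, decide_false]
    rw [List.all_eq_false]
    -- there is a mismatching position
    have hlen : w.length ≤ (ctx.drop k).length := by simp; omega
    have : ¬ ∀ i : Nat, i < w.length → ctx[k + i]? = w[i]? := by
      intro hall
      apply hp
      rw [List.prefix_iff_eq_take]
      apply List.ext_getElem?
      intro i
      rcases Nat.lt_or_ge i w.length with hi | hi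
      · rw [List.getElem?_take_of_lt hi, List.getElem?_drop, hall i hi]
      · rw [List.getElem?_eq_none (by omega), List.getElem?_eq_none (by simp; omega)]
    push Not at this
    obtain ⟨i, hi, hne⟩ := this
    refine ⟨(i : Int), ?_, ?_⟩
    · rw [PySem.List.mem_pyRange_one]
      constructor
      · exact_mod_cast Int.natCast_nonneg i
      · exact_mod_cast hi
    · have : (k : Int) + (i : Int) = ((k + i : Nat) : Int) := by push_cast; ring
      rw [this, PySem.List.pyGet?_natCast, PySem.List.pyGet?_natCast]
      simp [hne]

-- A's scan starting at k equals B's answer, provided no occurrence lies before k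
theorem pv_main (ctx w : List Char) (k : Nat)
    (hno : ∀ i, i < k → ¬ w <+: ctx.drop i) :
    pvAgoA ctx w k =
      (if PySem.Chars.find ctx w < 0 then [-1, -1]
       else [PySem.Chars.find ctx w, PySem.Chars.find ctx w + (w.length : Int)]) := by
  rw [pvAgoA]
  split
  · next h =>
    have hk : k + w.length ≤ ctx.length := by omega
    rw [pv_inner_prefix ctx w k hk]
    by_cases hp : w <+: ctx.drop k
    · -- found: first occurrence is exactly k
      have hfind : PySem.Chars.find ctx w = (k : Int) := by
        have hnn : 0 ≤ PySem.Chars.find ctx w := by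
          rw [PySem.Chars.find_nonneg_iff]
          exact hp.isInfix.trans (List.drop_suffix k ctx).isInfix
        obtain ⟨hpre, hfirst⟩ := PySem.Chars.find_spec hnn
        have h1 : ¬ (PySem.Chars.find ctx w).toNat < k := fun hlt => hno _ hlt hpre
        have h2 : ¬ k < (PySem.Chars.find ctx w).toNat := fun hlt => hfirst k hlt hp
        omega
      simp [hp, hfind]
    · -- not found at k: recurse with the invariant extended
      have : pvAgoA ctx w (k + 1) = _ := pv_main ctx w (k + 1)
        (by intro i hi
            rcases Nat.lt_or_ge i k with h' | h'
            · exact hno i h'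
            · have : i = k := by omega
              subst this; exact hp)
      simp [hp]
      exact this
  · next h =>
    -- index past len(context)-len(word): no occurrence at all
    have hfind : PySem.Chars.find ctx w = -1 := by
      rw [PySem.Chars.find_eq_neg_one_iff]
      intro hinf
      obtain ⟨j, hj⟩ := (PySem.Chars.exists_prefix_drop_iff_isIn w ctx).mpr
        ((PySem.Chars.isIn_iff_infix w ctx).mpr hinf)
      have hwlen : w.length + j ≤ ctx.length ∨ w.length = 0 := by
        have := hj.length_le
        simp only [List.length_drop] at this
        omega
      rcases Nat.lt_or_ge j k with hlt | hge
      · exact hno j hlt hj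
      · rcases hwlen with h1 | h1
        · omega
        · have hw : w = [] := List.eq_nil_of_length_eq_zero h1
          have hk0 : 0 < k := by omega
          exact hno 0 hk0 (by simp [hw])
    simp [hfind]
termination_by ctx.length + 1 - k
decreasing_by omega

-- ===== VERDICT (by name: the statement is the Claim_ definition above) =====
theorem find_word_indices_in_context_spec : Claim_equal_find_word_indices_in_context := by
  intro context word _
  unfold Spec_find_word_indices_in_context find_word_indices_in_context find_word_indices_in_context_alt
  rw [pv_main context.toList word.toList 0 (by intro i hi; omega)]
  have hf : PySem.Str.find context word = PySem.Chars.find context.toList word.toList := by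
    simp [PySem.Str.find_eq]
  have hl : (PySem.Str.len word : Int) = (word.toList.length : Int) := by
    simp [PySem.Str.len_eq]
  rw [hf, hl]
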